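-- pv_equiv track=rewrite | github.com/saurabh-learner2024/Leet_code_problems | collections/word_with_their_count.py | count_distinct_words
-- ===== SOURCE A (Python) =====
-- def count_distinct_words(words):
--     """
--     Counts the number of distinct words and their occurrences.
--
--     Args:
--     words (list): A list of words.
--
--     Returns:
--     tuple: Number of distinct words and a dictionary of word counts in the order of their appearance.
--     """
--     word_count = {}
--
--     for word in words:
--         if word in word_count:
--             word_count[word] += 1
--         else:
--             word_count[word] = 1
--
--     number_of_distinct_word = len(word_count)
--     return number_of_distinct_word, word_count
-- ===== SOURCE B (Python) =====
-- def count_distinct_words(words):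
--     """Two-pass version: first collect distinct words in order of first
--     appearance, then count each with list.count."""
--     distinct = []
--     seen = set()
--     for word in words:
--         if word not in seen:
--             seen.add(word)
--             distinct.append(word)
--     result = {}
--     for word in distinct:
--         result[word] = words.count(word)
--     return len(result), result
-- ===== Notes on version B (the rewrite author's own statement) =====
-- stated objective: alternative
-- what changed: Replaces the single counting-dict loop by two passes: one pass collects the distinct words in first-appearance order with a seen-set, then the result dict is built by setting result[word] = words.count(word) for each distinct word.
import Mathlib
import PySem

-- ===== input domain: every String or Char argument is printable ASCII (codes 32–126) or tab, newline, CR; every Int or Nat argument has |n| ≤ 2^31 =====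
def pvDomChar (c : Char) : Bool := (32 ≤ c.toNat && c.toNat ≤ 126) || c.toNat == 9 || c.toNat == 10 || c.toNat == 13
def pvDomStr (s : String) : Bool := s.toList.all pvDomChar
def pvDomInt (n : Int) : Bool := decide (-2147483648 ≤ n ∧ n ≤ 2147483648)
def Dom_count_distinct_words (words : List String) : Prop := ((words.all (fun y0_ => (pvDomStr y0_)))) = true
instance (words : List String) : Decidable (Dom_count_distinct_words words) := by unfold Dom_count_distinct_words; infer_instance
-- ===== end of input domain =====

-- B replaces A's single counting loop by two passes (ordered distinct list, then words.count per distinct word); alternative decomposition, not faster.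

-- ===== PORT A =====
def count_distinct_words (words : List String) : Int × (List (String × Int)) :=
  let word_count := words.foldl (fun d word =>
      if d.contains word then d.insert word (d.getD word 0 + 1)
      else d.insert word 1) PySem.Dict.empty
  ((word_count.size : Int), word_count.items)

-- ===== PORT B =====
def count_distinct_words_alt (words : List String) : Int × (List (String × Int)) :=
  let sd := words.foldl (fun (p : PySem.Set String × List String) word =>
      if PySem.Set.contains p.1 word then p
      else (PySem.Set.add p.1 word, p.2 ++ [word]))
    (PySem.Set.empty, [])
  let result := sd.2.foldl (fun d word => d.insert word ((words.count word : Int)))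
    PySem.Dict.empty
  ((result.size : Int), result.items)

-- ===== PRECONDITION & SPEC =====
def Spec_count_distinct_words (words : List String) (out : Int × (List (String × Int))) : Prop := out = count_distinct_words_alt words
instance (words : List String) (out : Int × (List (String × Int))) : Decidable (Spec_count_distinct_words words out) := by unfold Spec_count_distinct_words; infer_instance

-- ===== CLAIM (what is proved, stated in full; the proofs are below) =====
def Claim_equal_count_distinct_words : Prop := ∀ (words : List String), Dom_count_distinct_words words → Spec_count_distinct_words words (count_distinct_words words)

-- ===== LEMMAS AND PROOFS =====

-- A's loop is the standard counter loop
lemma a_fold_eq_counter (words : List String) :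
    words.foldl (fun d word =>
      if d.contains word then d.insert word (d.getD word 0 + 1)
      else d.insert word 1) PySem.Dict.empty = PySem.Dict.counter words := by
  rw [← PySem.Dict.foldl_insert_getD_add_one_eq_counter]
  apply PySem.List.foldl_congr_mem
  intro d w _
  by_cases h : d.contains w = true
  · simp [h]
  · rw [if_neg h, PySem.Dict.getD_of_not_contains d (0 : Int) (by simpa using h)]
    norm_num

-- B's first loop keeps its two accumulators equal and computes Set.update
lemma b_first_fold (l : List String) (s : PySem.Set String) :
    l.foldl (fun (p : PySem.Set String × List String) word =>
      if PySem.Set.contains p.1 word then p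
      else (PySem.Set.add p.1 word, p.2 ++ [word])) (s, s)
    = (PySem.Set.update s l, PySem.Set.update s l) := by
  induction l generalizing s with
  | nil => rfl
  | cons x xs ih =>
    have hupd : PySem.Set.update s (x :: xs) = PySem.Set.update (PySem.Set.add s x) xs := rfl
    rw [List.foldl_cons, hupd]
    by_cases h : PySem.Set.contains s x = true
    · have hm : x ∈ s := by simpa using h
      have ha : PySem.Set.add s x = s := by simp [PySem.Set.add, hm]
      rw [if_pos h, ha]
      exact ih s
    · have hm : x ∉ s := by simpa using h
      have ha : PySem.Set.add s x = s ++ [x] := by simp [PySem.Set.add, hm]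
      rw [if_neg h, ha]
      exact ih (s ++ [x])

-- ===== VERDICT (by name: the statement is the Claim_ definition above) =====
theorem count_distinct_words_spec : Claim_equal_count_distinct_words := by
  intro words _
  unfold Spec_count_distinct_words count_distinct_words count_distinct_words_alt
  simp only [a_fold_eq_counter]
  have hsd := b_first_fold words PySem.Set.empty
  have e : ((PySem.Set.empty : PySem.Set String), ([] : List String))
      = ((PySem.Set.empty : PySem.Set String), (PySem.Set.empty : PySem.Set String)) := rfl
  rw [e, hsd]
  have hofl : PySem.Set.update PySem.Set.empty words = PySem.Set.ofList words := by
    rfl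
  rw [hofl]
  have hitems :
      ((PySem.Set.ofList words).foldl
        (fun d word => d.insert word ((words.count word : Int))) PySem.Dict.empty).items
      = (PySem.Set.ofList words).map (fun w => (w, (words.count w : Int))) := by
    have := PySem.Dict.items_foldl_insert_fresh (l := PySem.Set.ofList words)
      (k := fun w => w) (v := fun w => ((words.count w : Int))) (d := PySem.Dict.empty)
      (by intro a _; simp) (by simpa using PySem.Set.nodup_ofList words)
    simpa using this
  have hd : (PySem.Set.ofList words).foldl
      (fun d word => d.insert word ((words.count word : Int))) PySem.Dict.empty
      = PySem.Dict.counter words := by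
    apply PySem.Dict.ext
    rw [hitems, PySem.Dict.items_counter]
  rw [hd]
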